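-- pv_equiv track=rewrite | github.com/aerovfx/Fullstack4kid | APPENDIX_A/Python/PythonChallenge/Level3/de2/SOV1.py | find_geometric_sequences
-- ===== SOURCE A (Python) =====
-- def find_geometric_sequences(a, q):
--     sequences = []
--     n = len(a)
--     for i in range(n):
--         for j in range(i + 1, n + 1):
--             subsequence = a[i:j]
--             is_geometric = True
--             for k in range(len(subsequence) - 1):
--                 if subsequence[k + 1] != subsequence[k] * q:
--                     is_geometric = False
--                     break
--             if is_geometric:
--                 sequences.append(subsequence)
--     return sequences
-- ===== SOURCE B (Python) =====
-- def find_geometric_sequences(a, q):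
--     n = len(a)
--     # precompute adjacency validity: ok[t] <=> a[t+1] == a[t] * q
--     ok = [y == x * q for x, y in zip(a, a[1:])]
--     out = []
--     for i in range(n):
--         end = i + 1
--         while end < n and ok[end - 1]:
--             end += 1
--         for j in range(i + 1, end + 1):
--             out.append(a[i:j])
--     return out
-- ===== Notes on version B (the rewrite author's own statement) =====
-- stated objective: faster
-- what changed: Replaces the O(n^3) triple loop (re-checking every subarray from scratch) by precomputing adjacent-ratio validity once, then for each start index finding the maximal geometric end with a single while loop and emitting all prefixes of that run.
import Mathlib
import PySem

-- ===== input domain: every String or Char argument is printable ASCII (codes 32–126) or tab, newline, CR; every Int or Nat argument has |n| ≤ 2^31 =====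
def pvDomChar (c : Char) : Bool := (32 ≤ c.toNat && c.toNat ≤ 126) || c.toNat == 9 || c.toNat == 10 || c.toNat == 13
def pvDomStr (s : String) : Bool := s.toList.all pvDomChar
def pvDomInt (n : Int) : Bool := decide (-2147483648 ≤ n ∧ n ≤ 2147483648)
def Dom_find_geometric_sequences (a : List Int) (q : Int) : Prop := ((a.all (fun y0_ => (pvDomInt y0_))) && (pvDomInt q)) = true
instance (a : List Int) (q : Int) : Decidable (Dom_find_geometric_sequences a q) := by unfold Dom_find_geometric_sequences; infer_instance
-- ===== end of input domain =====

-- B precomputes adjacent-ratio validity once and emits, per start index, all prefixes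
-- of the maximal geometric run, replacing A's per-subarray re-check (objective: faster).


-- ===== PORT A =====
-- A's inner `for k in range(len(subsequence) - 1)` with its early `break`: recursion
-- over the remaining k's; the indices k, k+1 are always in range on every reachable
-- call, so pyGetD's default is unreachable (exact there).
def pvCheckK (sub : List Int) (q : Int) : List Int → Bool
  | [] => true
  | k :: rest =>
    if PySem.List.pyGetD sub (k + 1) 0 ≠ PySem.List.pyGetD sub k 0 * q then false
    else pvCheckK sub q rest

def find_geometric_sequences (a : List Int) (q : Int) : List (List Int) :=
  let n : Int := a.length
  (PySem.List.pyRange 0 n 1).foldl (fun sequences i =>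
    (PySem.List.pyRange (i + 1) (n + 1) 1).foldl (fun sequences j =>
      let subsequence := PySem.List.slice a (some i) (some j)
      let is_geometric :=
        pvCheckK subsequence q (PySem.List.pyRange 0 ((subsequence.length : Int) - 1) 1)
      if is_geometric then sequences ++ [subsequence] else sequences) sequences) []

-- ===== PORT B =====
-- B's `while end < n and ok[end - 1]: end += 1`; the index end - 1 is always in range
-- when end < n, so pyGetD's default is unreachable (exact there).
def pvFindEnd (ok : List Bool) (n : Int) (e : Int) : Int :=
  if h : e < n ∧ PySem.List.pyGetD ok (e - 1) false = true then pvFindEnd ok n (e + 1)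
  else e
termination_by (n - e).toNat
decreasing_by omega

def find_geometric_sequences_alt (a : List Int) (q : Int) : List (List Int) :=
  let n : Int := a.length
  let ok := (a.zip (a.drop 1)).map (fun p => p.2 == p.1 * q)
  (PySem.List.pyRange 0 n 1).foldl (fun out i =>
    (PySem.List.pyRange (i + 1) (pvFindEnd ok n (i + 1) + 1) 1).foldl
      (fun out j => out ++ [PySem.List.slice a (some i) (some j)]) out) []

-- ===== PRECONDITION & SPEC =====
def Spec_find_geometric_sequences (a : List Int) (q : Int) (out : List (List Int)) : Prop := out = find_geometric_sequences_alt a q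
instance (a : List Int) (q : Int) (out : List (List Int)) : Decidable (Spec_find_geometric_sequences a q out) := by unfold Spec_find_geometric_sequences; infer_instance

-- ===== CLAIM (what is proved, stated in full; the proofs are below) =====
def Claim_equal_find_geometric_sequences : Prop := ∀ (a : List Int) (q : Int), Dom_find_geometric_sequences a q → Spec_find_geometric_sequences a q (find_geometric_sequences a q)

-- ===== LEMMAS AND PROOFS =====

-- "is geometric with ratio q", structurally
def pvGeo (q : Int) : List Int → Bool
  | [] => true
  | [_] => true
  | x :: y :: t => (y == x * q) && pvGeo q (y :: t)

-- length of the run of valid adjacent ratios from the head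
def pvChain (q : Int) : List Int → Nat
  | [] => 0
  | [_] => 0
  | x :: y :: t => if y = x * q then pvChain q (y :: t) + 1 else 0

-- run of `true`s at the head of a Bool list
def pvRunB : List Bool → Nat
  | true :: t => pvRunB t + 1
  | _ => 0

theorem pvGeo_short (q : Int) (t : List Int) (h : t.length ≤ 1) : pvGeo q t = true := by
  match t, h with
  | [], _ => rfl
  | [_], _ => rfl

-- A's k-loop from position s computes pvGeo of the corresponding suffix
theorem pvCheckK_from (q : Int) (sub : List Int) (s : Nat) :
    pvCheckK sub q (PySem.List.pyRange (s : Int) ((sub.length : Int) - 1) 1)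
      = pvGeo q (sub.drop s) := by
  by_cases hlt : (s : Int) < (sub.length : Int) - 1
  · have hs1 : s + 1 < sub.length := by omega
    have hs : s < sub.length := by omega
    rw [PySem.List.pyRange_one_cons hlt]
    have e1 : PySem.List.pyGetD sub ((s : Int) + 1) 0 = sub[s + 1] := by
      rw [show ((s : Int) + 1) = ((s + 1 : Nat) : Int) by push_cast; ring,
        PySem.List.pyGetD_eq_getElem sub 0 (by positivity) (by exact_mod_cast hs1)]
      simp
    have e2 : PySem.List.pyGetD sub (s : Int) 0 = sub[s] := by
      rw [PySem.List.pyGetD_eq_getElem sub 0 (by positivity) (by exact_mod_cast hs)]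
      simp
    have ih := pvCheckK_from q sub (s + 1)
    rw [List.drop_eq_getElem_cons hs, List.drop_eq_getElem_cons hs1] at *
    show (if PySem.List.pyGetD sub ((s : Int) + 1) 0 ≠ PySem.List.pyGetD sub (s : Int) 0 * q
        then false
        else pvCheckK sub q (PySem.List.pyRange ((s : Int) + 1) ((sub.length : Int) - 1) 1))
      = pvGeo q (sub[s] :: sub[s + 1] :: List.drop (s + 1 + 1) sub)
    rw [e1, e2]
    rw [show ((s : Int) + 1) = ((s + 1 : Nat) : Int) by push_cast; ring, ih]
    by_cases h : sub[s + 1] = sub[s] * q <;> simp [pvGeo, h]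
  · rw [PySem.List.pyRange_one_eq_nil (by omega)]
    have hlen : (sub.drop s).length ≤ 1 := by simp; omega
    simp [pvCheckK, pvGeo_short q _ hlen]
termination_by sub.length - s
decreasing_by omega

-- a prefix of length m is geometric iff it does not pass the first broken ratio
theorem pvGeo_take (q : Int) (t : List Int) (m : Nat) (hm : m ≤ t.length) :
    (pvGeo q (t.take m) = true ↔ m ≤ pvChain q t + 1) := by
  induction t using pvChain.induct q generalizing m with
  | case1 =>
    simp at hm; subst hm; simp [pvGeo, pvChain]
  | case2 x =>
    simp at hm
    interval_cases m <;> simp [pvGeo, pvChain]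
  | case3 x t ih =>
    match m with
    | 0 => simp [pvGeo]
    | 1 => simp [pvGeo, pvChain]
    | (m+2) =>
      have hm' : m + 1 ≤ (x * q :: t).length := by simpa using hm
      have := ih (m+1) hm'
      simp only [List.take_succ_cons, pvGeo, pvChain] at *
      simp [this]
  | case4 x y t h =>
    match m with
    | 0 => simp [pvGeo]
    | 1 => simp [pvGeo, pvChain, h]
    | (m+2) =>
      simp [pvGeo, pvChain, h]

theorem pvChain_le (q : Int) (t : List Int) : pvChain q t + 1 ≤ t.length ∨ t = [] := by
  induction t using pvChain.induct q with
  | case1 => right; rfl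
  | case2 x => left; simp [pvChain]
  | case3 x t ih =>
    left
    rcases ih with h | h
    · simp [pvChain] at *; omega
    · simp at h
  | case4 x y t h =>
    left; simp [pvChain, h]

-- B's while loop adds exactly the run of `true`s of ok starting at e - 1
theorem pvFindEnd_eq (ok : List Bool) (n e : Int) (h1 : 1 ≤ e) (h2 : e ≤ n)
    (hn : n = (ok.length : Int) + 1) :
    pvFindEnd ok n e = e + (pvRunB (ok.drop (e - 1).toNat) : Int) := by
  rw [pvFindEnd]
  by_cases he : e < n
  · have hidx : (e - 1).toNat < ok.length := by omega
    have hget : PySem.List.pyGetD ok (e - 1) false = ok[(e - 1).toNat] := by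
      rw [PySem.List.pyGetD_eq_getElem ok false (by omega) (by omega)]
    rw [List.drop_eq_getElem_cons hidx]
    by_cases hv : ok[(e - 1).toNat] = true
    · rw [dif_pos ⟨he, by rw [hget, hv]⟩]
      have ih := pvFindEnd_eq ok n (e + 1) (by omega) (by omega) hn
      rw [ih]
      have : (e + 1 - 1).toNat = (e - 1).toNat + 1 := by omega
      rw [this, hv]
      show e + 1 + (pvRunB (List.drop ((e - 1).toNat + 1) ok) : Int)
        = e + ((pvRunB (List.drop ((e - 1).toNat + 1) ok) + 1 : Nat) : Int)
      push_cast
      ring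
    · rw [dif_neg (by rw [hget]; exact fun h => hv h.2)]
      have hf : ok[(e - 1).toNat] = false := by simpa using hv
      rw [hf]
      show e = e + ((0 : Nat) : Int)
      simp
  · rw [dif_neg (by omega)]
    have : ok.length ≤ (e - 1).toNat := by omega
    rw [List.drop_eq_nil_of_le this]
    show e = e + ((0 : Nat) : Int)
    simp
termination_by (n - e).toNat
decreasing_by omega

-- the precomputed ok list counts exactly pvChain
theorem pvRunB_ok (q : Int) (t : List Int) :
    pvRunB ((t.zip (t.drop 1)).map (fun p => p.2 == p.1 * q)) = pvChain q t := by
  induction t using pvChain.induct q with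
  | case1 => rfl
  | case2 x => rfl
  | case3 x t ih =>
    simp only [List.drop_succ_cons, List.drop_zero, List.zip_cons_cons, List.map_cons] at *
    simp [pvRunB, pvChain, ih]
  | case4 x y t h =>
    simp only [List.drop_succ_cons, List.drop_zero, List.zip_cons_cons, List.map_cons]
    simp [pvRunB, pvChain, h]

theorem filter_le_pyRange (a m b : Int) (ha : a ≤ m + 1) (hb : m + 1 ≤ b) :
    (PySem.List.pyRange a b 1).filter (fun j => decide (j ≤ m))
      = PySem.List.pyRange a (m + 1) 1 := by
  rw [PySem.List.pyRange_one_append a (m + 1) b ha hb, List.filter_append]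
  have h1 : (PySem.List.pyRange a (m + 1) 1).filter (fun j => decide (j ≤ m))
      = PySem.List.pyRange a (m + 1) 1 := by
    apply List.filter_eq_self.2
    intro x hx
    simp [PySem.List.mem_pyRange_one] at hx
    simp; omega
  have h2 : (PySem.List.pyRange (m + 1) b 1).filter (fun j => decide (j ≤ m)) = [] := by
    apply List.filter_eq_nil_iff.2
    intro x hx
    simp [PySem.List.mem_pyRange_one] at hx
    simp; omega
  rw [h1, h2, List.append_nil]

-- ===== VERDICT (by name: the statement is the Claim_ definition above) =====
theorem find_geometric_sequences_spec : Claim_equal_find_geometric_sequences := by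
  intro a q _
  show find_geometric_sequences a q = find_geometric_sequences_alt a q
  simp only [find_geometric_sequences, find_geometric_sequences_alt,
    PySem.List.foldl_append_if, PySem.List.foldl_append_singleton_eq_map]
  apply PySem.List.foldl_congr_mem
  intro acc i hi
  rw [PySem.List.mem_pyRange_one] at hi
  congr 1
  -- notation
  have hilen : i.toNat < a.length := by omega
  have hok_len : ((a.zip (a.drop 1)).map (fun p => p.2 == p.1 * q)).length
      = a.length - 1 := by
    simp [List.length_zip]
  -- the while loop result
  have hend : pvFindEnd ((a.zip (a.drop 1)).map (fun p => p.2 == p.1 * q))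
      (a.length : Int) (i + 1)
      = i + 1 + (pvChain q (a.drop i.toNat) : Int) := by
    rw [pvFindEnd_eq _ _ _ (by omega) (by omega) (by rw [hok_len]; omega)]
    have hdrop : (((a.zip (a.drop 1)).map (fun p => p.2 == p.1 * q)).drop (i + 1 - 1).toNat)
        = ((a.drop i.toNat).zip ((a.drop i.toNat).drop 1)).map (fun p => p.2 == p.1 * q) := by
      have h1 : (i + 1 - 1).toNat = i.toNat := by omega
      rw [h1, ← List.map_drop, List.zip_eq_zipWith, List.drop_zipWith, List.drop_drop,
        ← List.zip_eq_zipWith]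
      have : i.toNat + 1 = 1 + i.toNat := by omega
      rw [List.drop_drop, this]
    rw [hdrop, pvRunB_ok]
  rw [hend]
  -- the valid end positions form exactly this contiguous range
  have hchain : (pvChain q (a.drop i.toNat) : Int) + 1 ≤ (a.length : Int) - i := by
    rcases pvChain_le q (a.drop i.toNat) with h | h
    · simp at h; omega
    · rw [List.drop_eq_nil_iff] at h; omega
  have hfilter : (PySem.List.pyRange (i + 1) ((a.length : Int) + 1) 1).filter
        (fun j => pvCheckK (PySem.List.slice a (some i) (some j)) q
          (PySem.List.pyRange 0 (((PySem.List.slice a (some i) (some j)).length : Int) - 1) 1))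
      = PySem.List.pyRange (i + 1) (i + 1 + (pvChain q (a.drop i.toNat) : Int) + 1) 1 := by
    rw [List.filter_congr (q := fun j => decide (j ≤ i + 1 + (pvChain q (a.drop i.toNat) : Int)))]
    · exact filter_le_pyRange _ _ _ (by omega) (by omega)
    · intro j hj
      rw [PySem.List.mem_pyRange_one] at hj
      have hslice : PySem.List.slice a (some i) (some j)
          = (a.drop i.toNat).take (j.toNat - i.toNat) :=
        PySem.List.slice_toNat a (by omega) (by omega)
      have hcf := pvCheckK_from q (PySem.List.slice a (some i) (some j)) 0
      simp only [Nat.cast_zero, List.drop_zero] at hcf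
      rw [hcf, hslice]
      have hm : j.toNat - i.toNat ≤ (a.drop i.toNat).length := by simp; omega
      have hiff := pvGeo_take q (a.drop i.toNat) (j.toNat - i.toNat) hm
      have h1 : (pvGeo q ((a.drop i.toNat).take (j.toNat - i.toNat)) = true)
          ↔ (j ≤ i + 1 + (pvChain q (a.drop i.toNat) : Int)) := by
        rw [hiff]; omega
      rw [show pvGeo q ((a.drop i.toNat).take (j.toNat - i.toNat))
          = decide (pvGeo q ((a.drop i.toNat).take (j.toNat - i.toNat)) = true) by simp,
        decide_eq_decide.mpr h1]
  rw [hfilter]
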